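-- pv_equiv track=rewrite | github.com/HENDRIX-ZT2/bfb-blender | import_dat.py | generate_mesh
-- ===== SOURCE A (Python) =====
-- def generate_mesh(x_verts, y_verts, scale, heights):
-- 	verts=[]
-- 	i=0
-- 	for y in range(y_verts):
-- 		for x in range(x_verts):
-- 			verts.append((x*scale, y*scale, heights[i]-7),)
-- 			i+=1
-- 	quads=[]
-- 	i=0
-- 	for x in range(x_verts-1):
-- 		for y in range(y_verts-1):
-- 			quads.append((i+1,i,i+y_verts,i+y_verts+1))
-- 			i+=1
-- 		i+=1
-- 	return verts, quads
-- ===== SOURCE B (Python) =====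
-- def generate_mesh(x_verts, y_verts, scale, heights):
-- 	nv = max(x_verts, 0) * max(y_verts, 0)
-- 	verts = []
-- 	for i in range(nv):
-- 		y, x = divmod(i, x_verts)
-- 		verts.append((x * scale, y * scale, heights[i] - 7))
-- 	nq = max(x_verts - 1, 0) * max(y_verts - 1, 0)
-- 	quads = []
-- 	for j in range(nq):
-- 		xq, r = divmod(j, y_verts - 1)
-- 		i = xq * y_verts + r
-- 		quads.append((i + 1, i, i + y_verts, i + y_verts + 1))
-- 	return verts, quads
-- ===== Notes on version B (the rewrite author's own statement) =====
-- stated objective: alternative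
-- what changed: Both nested coordinate loops with running counters are replaced by single flat loops over the total element count, recovering the grid coordinates from the flat index with divmod.
import Mathlib
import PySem

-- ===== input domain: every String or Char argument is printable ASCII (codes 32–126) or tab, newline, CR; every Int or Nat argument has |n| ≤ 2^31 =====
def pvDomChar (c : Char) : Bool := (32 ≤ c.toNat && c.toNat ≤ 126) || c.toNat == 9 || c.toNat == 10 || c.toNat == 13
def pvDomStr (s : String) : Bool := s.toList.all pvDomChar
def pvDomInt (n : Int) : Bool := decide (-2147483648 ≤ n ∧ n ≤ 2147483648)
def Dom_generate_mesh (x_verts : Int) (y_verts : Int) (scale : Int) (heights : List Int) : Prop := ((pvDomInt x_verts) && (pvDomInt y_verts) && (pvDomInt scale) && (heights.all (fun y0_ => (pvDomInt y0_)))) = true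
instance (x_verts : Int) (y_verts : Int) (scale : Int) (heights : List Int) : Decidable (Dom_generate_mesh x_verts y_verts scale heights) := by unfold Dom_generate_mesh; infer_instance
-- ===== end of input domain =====

-- B replaces A's nested coordinate loops with running counters by single flat loops over the
-- total element count, recovering the grid coordinates from the flat index with divmod
-- (objective: alternative; same cost).

-- ===== PORT A =====
def generate_mesh (x_verts : Int) (y_verts : Int) (scale : Int) (heights : List Int) : (List (Int × Int × Int)) × (List (Int × Int × Int × Int)) :=
  -- verts loop with running counter i (heights[i]: pyGetD; Pre_ keeps i in range)
  let pv := (PySem.List.pyRange 0 y_verts 1).foldl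
    (fun (s : List (Int × Int × Int) × Int) y =>
      (PySem.List.pyRange 0 x_verts 1).foldl
        (fun (t : List (Int × Int × Int) × Int) x =>
          (t.1 ++ [(x * scale, y * scale, PySem.List.pyGetD heights t.2 0 - 7)], t.2 + 1)) s)
    ([], 0)
  -- quads loop with running counter i and the end-of-row i += 1 skip
  let pq := (PySem.List.pyRange 0 (x_verts - 1) 1).foldl
    (fun (s : List (Int × Int × Int × Int) × Int) _x =>
      let t := (PySem.List.pyRange 0 (y_verts - 1) 1).foldl
        (fun (t : List (Int × Int × Int × Int) × Int) _y =>
          (t.1 ++ [(t.2 + 1, t.2, t.2 + y_verts, t.2 + y_verts + 1)], t.2 + 1)) s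
      (t.1, t.2 + 1))
    ([], 0)
  (pv.1, pq.1)

-- ===== PORT B =====
def generate_mesh_alt (x_verts : Int) (y_verts : Int) (scale : Int) (heights : List Int) : (List (Int × Int × Int)) × (List (Int × Int × Int × Int)) :=
  -- single flat loop over nv vertices; divmod(i, x_verts) recovers the coordinates
  let nv := max x_verts 0 * max y_verts 0
  let verts := (PySem.List.pyRange 0 nv 1).map (fun i =>
    (PySem.Int.mod i x_verts * scale, PySem.Int.floordiv i x_verts * scale,
     PySem.List.pyGetD heights i 0 - 7))
  -- single flat loop over nq quads; divmod(j, y_verts-1) recovers column and row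
  let nq := max (x_verts - 1) 0 * max (y_verts - 1) 0
  let quads := (PySem.List.pyRange 0 nq 1).map (fun j =>
    let i := PySem.Int.floordiv j (y_verts - 1) * y_verts + PySem.Int.mod j (y_verts - 1)
    (i + 1, i, i + y_verts, i + y_verts + 1))
  (verts, quads)

-- ===== PRECONDITION & SPEC =====
-- Pre_ excludes exactly the inputs where Python raises IndexError: a positive grid needing
-- more height samples than the list provides (both A and B index heights there).
def Pre_generate_mesh (x_verts : Int) (y_verts : Int) (scale : Int) (heights : List Int) : Prop :=
  0 < x_verts → 0 < y_verts → x_verts * y_verts ≤ (heights.length : Int)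
instance (x_verts : Int) (y_verts : Int) (scale : Int) (heights : List Int) : Decidable (Pre_generate_mesh x_verts y_verts scale heights) := by unfold Pre_generate_mesh; infer_instance
def pvWitness_generate_mesh : Int × Int × Int × List Int := (3, 2, 2, [0, 1, 2, 3, 4, 5])
def Spec_generate_mesh (x_verts : Int) (y_verts : Int) (scale : Int) (heights : List Int) (out : (List (Int × Int × Int)) × (List (Int × Int × Int × Int))) : Prop := out = generate_mesh_alt x_verts y_verts scale heights
instance (x_verts : Int) (y_verts : Int) (scale : Int) (heights : List Int) (out : (List (Int × Int × Int)) × (List (Int × Int × Int × Int))) : Decidable (Spec_generate_mesh x_verts y_verts scale heights out) := by unfold Spec_generate_mesh; infer_instance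

-- ===== CLAIM (what is proved, stated in full; the proofs are below) =====
def Claim_equal_generate_mesh : Prop := ∀ (x_verts : Int) (y_verts : Int) (scale : Int) (heights : List Int), Dom_generate_mesh x_verts y_verts scale heights → Pre_generate_mesh x_verts y_verts scale heights → Spec_generate_mesh x_verts y_verts scale heights (generate_mesh x_verts y_verts scale heights)

-- ===== LEMMAS AND PROOFS =====

-- a fold that appends one element per step while threading a counter = a map with the index computed directly
theorem pv_foldl_counter {β : Type} (f : Int → Int → β) (m : Nat) (acc : List β) (i : Int) :
    ((List.range m).map (fun (k : Nat) => (k : Int))).foldl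
        (fun (t : List β × Int) x => (t.1 ++ [f t.2 x], t.2 + 1)) (acc, i)
    = (acc ++ (List.range m).map (fun (k : Nat) => f (i + k) (k : Int)), i + m) := by
  induction m with
  | zero => simp
  | succ m ih =>
    rw [List.range_succ, List.map_append, List.foldl_append, ih]
    simp [List.foldl, List.append_assoc]
    ring

-- a fold that appends a block per step while advancing the counter by a fixed c = a flatMap
theorem pv_foldl_block {β : Type} (row : Int → Int → List β) (c : Nat) (m : Nat) (acc : List β) (i : Int) :
    ((List.range m).map (fun (k : Nat) => (k : Int))).foldl
        (fun (t : List β × Int) y => (t.1 ++ row t.2 y, t.2 + (c : Int))) (acc, i)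
    = (acc ++ (List.range m).flatMap (fun (k : Nat) => row (i + c * k) (k : Int)), i + c * m) := by
  induction m with
  | zero => simp
  | succ m ih =>
    rw [List.range_succ, List.map_append, List.foldl_append, ih]
    simp [List.foldl, List.append_assoc]
    ring

-- pyRange from 0 as a mapped List.range
theorem pv_pyRange_zero (n : Int) :
    PySem.List.pyRange 0 n 1 = (List.range n.toNat).map (fun (k : Nat) => (k : Int)) := by
  rw [PySem.List.pyRange_one]; simp

theorem pv_flatMap_congr {α β : Type} {l : List α} {f g : α → List β}
    (h : ∀ a ∈ l, f a = g a) : l.flatMap f = l.flatMap g := by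
  induction l with
  | nil => rfl
  | cons a l ih =>
    simp only [List.flatMap_cons]
    rw [h a (List.mem_cons_self), ih (fun b hb => h b (List.mem_cons_of_mem a hb))]

-- flattening nested ranges: flatMap of maps = one map over the product range with div/mod
theorem pv_flat {β : Type} (f : Nat → Nat → β) (a b : Nat) :
    (List.range a).flatMap (fun x => (List.range b).map (f x))
    = (List.range (a * b)).map (fun j => f (j / b) (j % b)) := by
  induction a with
  | zero => simp
  | succ a ih =>
    rw [List.range_succ, List.flatMap_append, ih]
    have h1 : (a + 1) * b = a * b + b := by ring
    rw [h1, List.range_add, List.map_append]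
    congr 1
    · simp only [List.flatMap_cons, List.flatMap_nil, List.append_nil, List.map_map]
      refine List.map_congr_left (fun k hk => ?_)
      have hkb : k < b := List.mem_range.mp hk
      have hb : 0 < b := Nat.lt_of_le_of_lt (Nat.zero_le k) hkb
      have hdiv : (a * b + k) / b = a := by
        rw [Nat.mul_comm a b, Nat.mul_add_div hb, Nat.div_eq_of_lt hkb, Nat.add_zero]
      have hmod : (a * b + k) % b = k := by
        rw [Nat.mul_comm a b, Nat.mul_add_mod, Nat.mod_eq_of_lt hkb]
      simp [Function.comp, hdiv, hmod]

-- the verts component of A: counter fold = direct-index flatMap comprehension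
theorem pv_verts_eq (x_verts y_verts scale : Int) (heights : List Int) :
    ((PySem.List.pyRange 0 y_verts 1).foldl
      (fun (s : List (Int × Int × Int) × Int) y =>
        (PySem.List.pyRange 0 x_verts 1).foldl
          (fun (t : List (Int × Int × Int) × Int) x =>
            (t.1 ++ [(x * scale, y * scale, PySem.List.pyGetD heights t.2 0 - 7)], t.2 + 1)) s)
      ([], 0)).1
    = (PySem.List.pyRange 0 y_verts 1).flatMap (fun y =>
        (PySem.List.pyRange 0 x_verts 1).map (fun x =>
          (x * scale, y * scale, PySem.List.pyGetD heights (y * x_verts + x) 0 - 7))) := by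
  rw [pv_pyRange_zero y_verts, pv_pyRange_zero x_verts]
  have hb : (fun (s : List (Int × Int × Int) × Int) (y : Int) =>
      ((List.range x_verts.toNat).map (fun (k : Nat) => (k : Int))).foldl
        (fun (t : List (Int × Int × Int) × Int) x =>
          (t.1 ++ [(x * scale, y * scale, PySem.List.pyGetD heights t.2 0 - 7)], t.2 + 1)) s)
      = (fun (s : List (Int × Int × Int) × Int) (y : Int) =>
          (s.1 ++ (List.range x_verts.toNat).map
              (fun (k : Nat) => ((k : Int) * scale, y * scale, PySem.List.pyGetD heights (s.2 + k) 0 - 7)),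
           s.2 + (x_verts.toNat : Int))) := by
    funext s y
    cases s with
    | mk a i =>
      exact pv_foldl_counter
        (fun i x => (x * scale, y * scale, PySem.List.pyGetD heights i 0 - 7)) x_verts.toNat a i
  rw [hb]
  rw [pv_foldl_block
        (fun i y => (List.range x_verts.toNat).map
          (fun (k : Nat) => ((k : Int) * scale, y * scale, PySem.List.pyGetD heights (i + k) 0 - 7)))
        x_verts.toNat y_verts.toNat [] 0]
  rw [List.flatMap_map]
  simp only [List.nil_append]
  refine pv_flatMap_congr (fun k _hk => ?_)
  rw [List.map_map]
  refine List.map_congr_left (fun j hj => ?_)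
  have hx : 0 ≤ x_verts := by
    by_contra hneg
    have : x_verts.toNat = 0 := Int.toNat_of_nonpos (by omega)
    rw [this] at hj; simp at hj
  have hcast : (x_verts.toNat : Int) = x_verts := Int.toNat_of_nonneg hx
  simp only [Function.comp]
  rw [hcast]
  ring_nf

-- the quads component of A: counter fold with end-of-row skip = direct-index flatMap comprehension
theorem pv_quads_eq (x_verts y_verts : Int) :
    ((PySem.List.pyRange 0 (x_verts - 1) 1).foldl
      (fun (s : List (Int × Int × Int × Int) × Int) _x =>
        let t := (PySem.List.pyRange 0 (y_verts - 1) 1).foldl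
          (fun (t : List (Int × Int × Int × Int) × Int) _y =>
            (t.1 ++ [(t.2 + 1, t.2, t.2 + y_verts, t.2 + y_verts + 1)], t.2 + 1)) s
        (t.1, t.2 + 1))
      ([], 0)).1
    = (PySem.List.pyRange 0 (x_verts - 1) 1).flatMap (fun x =>
        (PySem.List.pyRange 0 (y_verts - 1) 1).map (fun y =>
          (x * y_verts + y + 1, x * y_verts + y,
           x * y_verts + y + y_verts, x * y_verts + y + y_verts + 1))) := by
  rw [pv_pyRange_zero (x_verts - 1), pv_pyRange_zero (y_verts - 1)]
  have hb : (fun (s : List (Int × Int × Int × Int) × Int) (_x : Int) =>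
      let t := ((List.range (y_verts - 1).toNat).map (fun (k : Nat) => (k : Int))).foldl
        (fun (t : List (Int × Int × Int × Int) × Int) _y =>
          (t.1 ++ [(t.2 + 1, t.2, t.2 + y_verts, t.2 + y_verts + 1)], t.2 + 1)) s
      (t.1, t.2 + 1))
      = (fun (s : List (Int × Int × Int × Int) × Int) (_x : Int) =>
          (s.1 ++ (List.range (y_verts - 1).toNat).map
              (fun (k : Nat) => (s.2 + k + 1, s.2 + k, s.2 + k + y_verts, s.2 + k + y_verts + 1)),
           s.2 + (((y_verts - 1).toNat + 1 : Nat) : Int))) := by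
    funext s x
    cases s with
    | mk a i =>
      simp only []
      rw [pv_foldl_counter
        (fun i _y => (i + 1, i, i + y_verts, i + y_verts + 1)) (y_verts - 1).toNat a i]
      refine Prod.ext rfl ?_
      push_cast; ring
  rw [hb]
  rw [pv_foldl_block
        (fun i _x => (List.range (y_verts - 1).toNat).map
          (fun (k : Nat) => (i + k + 1, i + k, i + k + y_verts, i + k + y_verts + 1)))
        ((y_verts - 1).toNat + 1) (x_verts - 1).toNat [] 0]
  rw [List.flatMap_map]
  simp only [List.nil_append]
  refine pv_flatMap_congr (fun x _hx => ?_)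
  rw [List.map_map]
  refine List.map_congr_left (fun k hk => ?_)
  have hy : 1 ≤ y_verts - 1 := by
    by_contra hneg
    have : (y_verts - 1).toNat = 0 := Int.toNat_of_nonpos (by omega)
    rw [this] at hk; simp at hk
  have hcast : ((y_verts - 1).toNat : Int) = y_verts - 1 := Int.toNat_of_nonneg (by omega)
  push_cast [hcast]
  simp only [Function.comp_apply]
  refine Prod.ext (by ring) (Prod.ext (by ring) (Prod.ext (by ring) (by ring)))

-- (max a 0 * max b 0).toNat = a.toNat * b.toNat
theorem pv_toNat_mul_max (a b : Int) : (max a 0 * max b 0).toNat = a.toNat * b.toNat := by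
  rw [← Int.toNat_eq_max a, ← Int.toNat_eq_max b, ← Nat.cast_mul, Int.toNat_natCast]

-- the verts flatMap comprehension = B's single flat divmod map
theorem pv_verts_flat (x_verts y_verts scale : Int) (heights : List Int) :
    (PySem.List.pyRange 0 y_verts 1).flatMap (fun y =>
        (PySem.List.pyRange 0 x_verts 1).map (fun x =>
          (x * scale, y * scale, PySem.List.pyGetD heights (y * x_verts + x) 0 - 7)))
    = (PySem.List.pyRange 0 (max x_verts 0 * max y_verts 0) 1).map (fun i =>
        (PySem.Int.mod i x_verts * scale, PySem.Int.floordiv i x_verts * scale,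
         PySem.List.pyGetD heights i 0 - 7)) := by
  rw [pv_pyRange_zero y_verts, pv_pyRange_zero x_verts,
      pv_pyRange_zero (max x_verts 0 * max y_verts 0), pv_toNat_mul_max,
      List.flatMap_map]
  have hinner : ∀ yk : Nat, ((List.range x_verts.toNat).map (fun (k : Nat) => (k : Int))).map
        (fun x => (x * scale, ((yk : Int)) * scale,
          PySem.List.pyGetD heights ((yk : Int) * x_verts + x) 0 - 7))
      = (List.range x_verts.toNat).map (fun (xk : Nat) =>
          ((xk : Int) * scale, (yk : Int) * scale,
           PySem.List.pyGetD heights ((yk : Int) * x_verts + (xk : Int)) 0 - 7)) := by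
    intro yk; rw [List.map_map]; rfl
  simp only [Function.comp, hinner]
  rw [pv_flat (fun yk xk =>
        ((xk : Int) * scale, (yk : Int) * scale,
         PySem.List.pyGetD heights ((yk : Int) * x_verts + (xk : Int)) 0 - 7))
      y_verts.toNat x_verts.toNat,
      List.map_map, Nat.mul_comm x_verts.toNat y_verts.toNat]
  refine List.map_congr_left (fun j hj => ?_)
  have hjlt : j < y_verts.toNat * x_verts.toNat := List.mem_range.mp hj
  have hbpos : 0 < x_verts.toNat := by
    rcases Nat.eq_zero_or_pos x_verts.toNat with h | h
    · rw [h, Nat.mul_zero] at hjlt; omega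
    · exact h
  have hxv : ((x_verts.toNat : Nat) : Int) = x_verts := Int.toNat_of_nonneg (by omega)
  have hmod : PySem.Int.mod (j : Int) x_verts = ((j % x_verts.toNat : Nat) : Int) := by
    rw [← hxv]; exact PySem.Int.mod_natCast j x_verts.toNat
  have hdiv : PySem.Int.floordiv (j : Int) x_verts = ((j / x_verts.toNat : Nat) : Int) := by
    rw [← hxv]; exact PySem.Int.floordiv_natCast j x_verts.toNat
  have hidx : ((j / x_verts.toNat : Nat) : Int) * x_verts + ((j % x_verts.toNat : Nat) : Int)
      = (j : Int) := by
    rw [← hxv]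
    have h := Nat.div_add_mod j x_verts.toNat
    rw [Nat.mul_comm] at h
    exact_mod_cast h
  rw [Function.comp_apply, hmod, hdiv, hidx]

-- the quads flatMap comprehension = B's single flat divmod map
theorem pv_quads_flat (x_verts y_verts : Int) :
    (PySem.List.pyRange 0 (x_verts - 1) 1).flatMap (fun x =>
        (PySem.List.pyRange 0 (y_verts - 1) 1).map (fun y =>
          (x * y_verts + y + 1, x * y_verts + y,
           x * y_verts + y + y_verts, x * y_verts + y + y_verts + 1)))
    = (PySem.List.pyRange 0 (max (x_verts - 1) 0 * max (y_verts - 1) 0) 1).map (fun j =>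
        let i := PySem.Int.floordiv j (y_verts - 1) * y_verts + PySem.Int.mod j (y_verts - 1)
        (i + 1, i, i + y_verts, i + y_verts + 1)) := by
  rw [pv_pyRange_zero (x_verts - 1), pv_pyRange_zero (y_verts - 1),
      pv_pyRange_zero (max (x_verts - 1) 0 * max (y_verts - 1) 0), pv_toNat_mul_max,
      List.flatMap_map]
  have hinner : ∀ xk : Nat, ((List.range (y_verts - 1).toNat).map (fun (k : Nat) => (k : Int))).map
        (fun y => ((xk : Int) * y_verts + y + 1, (xk : Int) * y_verts + y,
          (xk : Int) * y_verts + y + y_verts, (xk : Int) * y_verts + y + y_verts + 1))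
      = (List.range (y_verts - 1).toNat).map (fun (yk : Nat) =>
          ((xk : Int) * y_verts + (yk : Int) + 1, (xk : Int) * y_verts + (yk : Int),
           (xk : Int) * y_verts + (yk : Int) + y_verts,
           (xk : Int) * y_verts + (yk : Int) + y_verts + 1)) := by
    intro xk; rw [List.map_map]; rfl
  simp only [Function.comp, hinner]
  rw [pv_flat (fun xk yk =>
        ((xk : Int) * y_verts + (yk : Int) + 1, (xk : Int) * y_verts + (yk : Int),
         (xk : Int) * y_verts + (yk : Int) + y_verts,
         (xk : Int) * y_verts + (yk : Int) + y_verts + 1))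
      (x_verts - 1).toNat (y_verts - 1).toNat,
      List.map_map]
  refine List.map_congr_left (fun j hj => ?_)
  have hjlt : j < (x_verts - 1).toNat * (y_verts - 1).toNat := List.mem_range.mp hj
  have hbpos : 0 < (y_verts - 1).toNat := by
    rcases Nat.eq_zero_or_pos (y_verts - 1).toNat with h | h
    · rw [h, Nat.mul_zero] at hjlt; omega
    · exact h
  have hyv : (((y_verts - 1).toNat : Nat) : Int) = y_verts - 1 := Int.toNat_of_nonneg (by omega)
  have hmod : PySem.Int.mod (j : Int) (y_verts - 1) = ((j % (y_verts - 1).toNat : Nat) : Int) := by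
    rw [← hyv]; exact PySem.Int.mod_natCast j (y_verts - 1).toNat
  have hdiv : PySem.Int.floordiv (j : Int) (y_verts - 1)
      = ((j / (y_verts - 1).toNat : Nat) : Int) := by
    rw [← hyv]; exact PySem.Int.floordiv_natCast j (y_verts - 1).toNat
  simp only [Function.comp_apply, hmod, hdiv]

theorem generate_mesh_spec : Claim_equal_generate_mesh := by
  intro x_verts y_verts scale heights _hdom _hpre
  unfold Spec_generate_mesh generate_mesh generate_mesh_alt
  refine Prod.ext ?_ ?_
  · exact (pv_verts_eq x_verts y_verts scale heights).trans
      (pv_verts_flat x_verts y_verts scale heights)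
  · exact (pv_quads_eq x_verts y_verts).trans (pv_quads_flat x_verts y_verts)
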